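-- pv_equiv track=rewrite | github.com/runtimeverification/proof-generation | ml/metamath/composer.py | encode_index
-- ===== SOURCE A (Python) =====
-- def encode_index(n: int) -> str:
--     """
--     Encode an index in the Metamath compressed proof format
--     """
--
--     number = n - 1
--     final_letter = chr(ord("A") + number % 20)
--     if number < 20:
--         return final_letter
--
--     number //= 20
--
--     letters = []
--     while True:
--         number -= 1
--         letters.append(chr(ord("U") + ((number % 5))))
--         number //= 5
--         if not number:
--             break
--
--     letters.reverse()
--     letters.append(final_letter)
--     return "".join(letters)
-- ===== SOURCE B (Python) =====
-- def encode_index(n: int) -> str: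
--     number = n - 1
--     final_letter = chr(ord("A") + number % 20)
--     if number < 20:
--         return final_letter
--
--     def g(m: int) -> str:
--         if m == 0:
--             return ""
--         return g((m - 1) // 5) + chr(ord("U") + (m - 1) % 5)
--
--     return g(number // 20) + final_letter
-- ===== Notes on version B (the rewrite author's own statement) =====
-- stated objective: simpler
-- what changed: The reverse-built list + reverse()+join while-loop for the high digits is replaced by a recursive bijective-base-5 helper that emits the digits directly in order.
import Mathlib
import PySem

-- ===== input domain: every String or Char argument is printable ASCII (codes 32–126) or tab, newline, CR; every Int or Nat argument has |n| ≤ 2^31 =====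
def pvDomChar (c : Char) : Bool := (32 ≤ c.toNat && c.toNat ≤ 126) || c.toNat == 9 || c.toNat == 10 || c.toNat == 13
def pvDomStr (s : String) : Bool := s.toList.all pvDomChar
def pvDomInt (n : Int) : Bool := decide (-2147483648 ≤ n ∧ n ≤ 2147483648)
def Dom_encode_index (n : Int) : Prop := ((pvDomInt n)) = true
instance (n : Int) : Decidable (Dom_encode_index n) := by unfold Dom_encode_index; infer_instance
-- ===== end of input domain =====

-- B replaces the reverse-built list / reverse() / join while-loop by a recursive bijective-base-5
-- helper emitting the high digits directly in order (objective: simpler).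

-- ===== PORT A =====
-- the while-loop of A; fuel makes it total (64 steps far exceed any |n| ≤ 2^31 run; A's own loop
-- would not terminate on inputs it is never reached from, and is never reached with fuel exhausted on Dom)
def encode_index_loop : Nat → Int → List Char → List Char
  | 0, _, letters => letters
  | fuel+1, number, letters =>
    let number := number - 1
    let letters := letters ++ [Char.ofNat (85 + PySem.Int.mod number 5).toNat]
    let number := PySem.Int.floordiv number 5
    if number = 0 then letters else encode_index_loop fuel number letters

def encode_index (n : Int) : String :=
  let number := n - 1
  let final_letter : Char := Char.ofNat (65 + PySem.Int.mod number 20).toNat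
  if number < 20 then String.ofList [final_letter]
  else
    let number := PySem.Int.floordiv number 20
    let letters := encode_index_loop 64 number []
    String.ofList (letters.reverse ++ [final_letter])

-- ===== PORT B =====
-- recursive helper g of Source B; same totality fuel
def encode_index_g : Nat → Int → List Char
  | 0, _ => []
  | fuel+1, m =>
    if m = 0 then []
    else encode_index_g fuel (PySem.Int.floordiv (m - 1) 5) ++ [Char.ofNat (85 + PySem.Int.mod (m - 1) 5).toNat]

def encode_index_alt (n : Int) : String :=
  let number := n - 1
  let final_letter : Char := Char.ofNat (65 + PySem.Int.mod number 20).toNat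
  if number < 20 then String.ofList [final_letter]
  else String.ofList (encode_index_g 64 (PySem.Int.floordiv number 20) ++ [final_letter])

-- ===== PRECONDITION & SPEC =====
def Spec_encode_index (n : Int) (out : String) : Prop := out = encode_index_alt n
instance (n : Int) (out : String) : Decidable (Spec_encode_index n out) := by unfold Spec_encode_index; infer_instance

-- ===== CLAIM (what is proved, stated in full; the proofs are below) =====
def Claim_equal_encode_index : Prop := ∀ (n : Int), Dom_encode_index n → Spec_encode_index n (encode_index n)

-- ===== LEMMAS AND PROOFS =====

lemma encode_index_g_zero (fuel : Nat) : encode_index_g fuel 0 = [] := by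
  cases fuel <;> simp [encode_index_g]

lemma loop_eq_g_reverse : ∀ (fuel : Nat) (m : Int) (acc : List Char),
    1 ≤ m → m ≤ 5 ^ fuel →
    encode_index_loop fuel m acc = acc ++ (encode_index_g fuel m).reverse := by
  intro fuel
  induction fuel with
  | zero =>
    intro m acc h1 h2
    simp [encode_index_loop, encode_index_g]
  | succ f ih =>
    intro m acc h1 h2
    have hm : m ≠ 0 := by omega
    have hq : PySem.Int.floordiv (m - 1) 5 = (m - 1) / 5 :=
      PySem.Int.floordiv_eq_ediv_of_pos (by norm_num)
    have hq0 : 0 ≤ (m - 1) / 5 := Int.ediv_nonneg (by omega) (by norm_num)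
    have hqlt : (m - 1) / 5 ≤ 5 ^ f := by
      have h5 : (5:Int) ^ (f + 1) = 5 ^ f * 5 := by ring
      have hle : m - 1 ≤ 5 ^ f * 5 := by rw [← h5]; omega
      calc (m - 1) / 5 ≤ (5 ^ f * 5) / 5 := Int.ediv_le_ediv (by norm_num) hle
        _ = 5 ^ f := Int.mul_ediv_cancel _ (by norm_num)
    simp only [encode_index_loop, encode_index_g, if_neg hm, hq]
    by_cases h0 : (m - 1) / 5 = 0
    · simp [h0, encode_index_g_zero]
    · rw [if_neg h0, ih _ _ (by omega) hqlt]
      simp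

theorem encode_index_spec : Claim_equal_encode_index := by
  intro n hdom
  unfold Spec_encode_index encode_index encode_index_alt
  simp only []
  by_cases hlt : n - 1 < 20
  · simp [hlt]
  · rw [if_neg hlt, if_neg hlt]
    have hfd : PySem.Int.floordiv (n - 1) 20 = (n - 1) / 20 :=
      PySem.Int.floordiv_eq_ediv_of_pos (by norm_num)
    have h1 : 1 ≤ (n - 1) / 20 := by
      have : (1:Int) * 20 ≤ n - 1 := by omega
      exact Int.le_ediv_iff_mul_le (by norm_num) |>.mpr this
    have hdb : n ≤ 2147483648 := by
      have := of_decide_eq_true hdom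
      simp at this; omega
    have hub : (n - 1) / 20 ≤ 5 ^ 64 := by
      have h2 : (n - 1) / 20 ≤ n - 1 := by
        exact Int.ediv_le_self _ (by omega)
      have : (2147483648 : Int) ≤ 5 ^ 64 := by norm_num
      omega
    rw [hfd, loop_eq_g_reverse 64 _ [] h1 hub]
    simp

-- ===== VERDICT (by name: the statement is the Claim_ definition above) =====
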